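-- pv_equiv track=rewrite | github.com/RenatoPhys/aws-automl | bookquery_v2.py | _calculate_start_date
-- ===== SOURCE A (Python) =====
-- def _calculate_start_date(reference_date: str, months_back: int, date_format: str = '%Y%m') -> str:
--     """
--     Calcula a data de início baseada na data de referência e meses retroativos.
--     """
--     if date_format == '%Y%m':
--         ref_year = int(reference_date[:4])
--         ref_month = int(reference_date[4:6])
--
--         start_month = ref_month - months_back + 1
--         start_year = ref_year
--
--         while start_month <= 0:
--             start_month += 12
--             start_year -= 1
--
--         return f"{start_year:04d}{start_month:02d}"
--     else:
--         return reference_date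
-- ===== SOURCE B (Python) =====
-- def _calculate_start_date(reference_date: str, months_back: int, date_format: str = '%Y%m') -> str:
--     """Closed-form month/year normalization instead of the while-loop."""
--     if date_format != '%Y%m':
--         return reference_date
--     year = int(reference_date[:4])
--     month = int(reference_date[4:6]) - months_back + 1
--     if month <= 0:
--         year += (month - 1) // 12
--         month = (month - 1) % 12 + 1
--     return f"{year:04d}{month:02d}"
-- ===== Notes on version B (the rewrite author's own statement) =====
-- stated objective: simpler
-- what changed: The while-loop that repeatedly adds 12 to the month and decrements the year is replaced by closed-form floor-division/modulo arithmetic applied once when the computed month is non-positive.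
import Mathlib
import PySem

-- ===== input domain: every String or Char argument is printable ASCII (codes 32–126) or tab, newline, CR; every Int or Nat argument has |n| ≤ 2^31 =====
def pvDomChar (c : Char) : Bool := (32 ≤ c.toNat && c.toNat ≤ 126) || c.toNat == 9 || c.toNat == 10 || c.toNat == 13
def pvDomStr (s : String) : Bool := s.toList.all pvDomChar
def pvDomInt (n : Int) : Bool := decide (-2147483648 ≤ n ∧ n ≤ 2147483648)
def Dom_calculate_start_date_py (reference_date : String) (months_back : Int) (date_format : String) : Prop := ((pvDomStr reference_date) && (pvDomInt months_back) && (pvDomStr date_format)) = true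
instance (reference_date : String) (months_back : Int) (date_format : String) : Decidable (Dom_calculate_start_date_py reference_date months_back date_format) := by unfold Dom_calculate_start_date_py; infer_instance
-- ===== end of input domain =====

-- B replaces A's while-loop month/year normalization by one closed-form floordiv/mod step (simpler).

-- ===== PORT A =====
-- A's f"{n:0Wd}" zero-padded formatting
def pvPadA (w : Nat) (cs : List Char) : List Char := List.replicate (w - cs.length) '0' ++ cs
def pvFmtA (w : Nat) (n : Int) : List Char :=
  if n < 0 then '-' :: pvPadA (w - 1) (PySem.Int.toChars (-n)) else pvPadA w (PySem.Int.toChars n)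

-- the while-loop: while start_month <= 0: start_month += 12; start_year -= 1
def pvLoopA (y m : Int) : Int × Int :=
  if m ≤ 0 then pvLoopA (y - 1) (m + 12) else (y, m)
termination_by (1 - m).toNat
decreasing_by omega

def calculate_start_date_py (reference_date : String) (months_back : Int) (date_format : String) : String :=
  if date_format = "%Y%m" then
    match PySem.Int.ofStr? (PySem.Str.slice reference_date none (some 4)),
          PySem.Int.ofStr? (PySem.Str.slice reference_date (some 4) (some 6)) with
    | some ref_year, some ref_month =>
      let p := pvLoopA ref_year (ref_month - months_back + 1)
      String.ofList (pvFmtA 4 p.1 ++ pvFmtA 2 p.2)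
    | _, _ => ""   -- int() raises ValueError here; excluded by Pre_
  else reference_date

-- ===== PORT B =====
-- B's f"{n:0Wd}" zero-padded formatting
def pvPadB (w : Nat) (cs : List Char) : List Char := List.replicate (w - cs.length) '0' ++ cs
def pvFmtB (w : Nat) (n : Int) : List Char :=
  if n < 0 then '-' :: pvPadB (w - 1) (PySem.Int.toChars (-n)) else pvPadB w (PySem.Int.toChars n)
def calculate_start_date_py_alt (reference_date : String) (months_back : Int) (date_format : String) : String :=
  if date_format ≠ "%Y%m" then reference_date
  else
    match PySem.Int.ofStr? (PySem.Str.slice reference_date none (some 4)) with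
    | none => ""   -- int() raises ValueError here; excluded by Pre_
    | some year =>
      match PySem.Int.ofStr? (PySem.Str.slice reference_date (some 4) (some 6)) with
      | none => ""
      | some rm =>
        let month := rm - months_back + 1
        let p := if month ≤ 0 then
                   (year + PySem.Int.floordiv (month - 1) 12, PySem.Int.mod (month - 1) 12 + 1)
                 else (year, month)
        String.ofList (pvFmtB 4 p.1 ++ pvFmtB 2 p.2)
  -- (B's Python raises the same ValueError there)

-- ===== PRECONDITION & SPEC =====
-- Pre_: when date_format is '%Y%m', the two slices must parse as Python ints (else A raises ValueError)
def Pre_calculate_start_date_py (reference_date : String) (months_back : Int) (date_format : String) : Prop :=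
  date_format = "%Y%m" →
    (PySem.Int.ofStr? (PySem.Str.slice reference_date none (some 4))).isSome ∧
    (PySem.Int.ofStr? (PySem.Str.slice reference_date (some 4) (some 6))).isSome
instance (reference_date : String) (months_back : Int) (date_format : String) : Decidable (Pre_calculate_start_date_py reference_date months_back date_format) := by unfold Pre_calculate_start_date_py; infer_instance

def pvWitness_calculate_start_date_py : String × Int × String := ("202103", 5, "%Y%m")

def Spec_calculate_start_date_py (reference_date : String) (months_back : Int) (date_format : String) (out : String) : Prop := out = calculate_start_date_py_alt reference_date months_back date_format
instance (reference_date : String) (months_back : Int) (date_format : String) (out : String) : Decidable (Spec_calculate_start_date_py reference_date months_back date_format out) := by unfold Spec_calculate_start_date_py; infer_instance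

-- ===== CLAIM (what is proved, stated in full; the proofs are below) =====
def Claim_equal_calculate_start_date_py : Prop := ∀ (reference_date : String) (months_back : Int) (date_format : String), Dom_calculate_start_date_py reference_date months_back date_format → Pre_calculate_start_date_py reference_date months_back date_format → Spec_calculate_start_date_py reference_date months_back date_format (calculate_start_date_py reference_date months_back date_format)

-- ===== LEMMAS AND PROOFS =====
lemma pvLoopA_closed (n : Nat) : ∀ (y m : Int), (1 - m).toNat ≤ n →
    pvLoopA y m = if m ≤ 0 then (y + PySem.Int.floordiv (m - 1) 12, PySem.Int.mod (m - 1) 12 + 1)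
                  else (y, m) := by
  induction n with
  | zero =>
    intro y m h
    rw [pvLoopA]
    have hm : 0 < m := by omega
    simp [not_le.mpr hm]
  | succ n ih =>
    intro y m h
    rw [pvLoopA]
    by_cases hm : m ≤ 0
    · rw [ih (y - 1) (m + 12) (by omega)]
      rw [PySem.Int.floordiv_eq_ediv_of_pos (by norm_num : (0:Int) < 12),
          PySem.Int.mod_eq_emod_of_pos (by norm_num : (0:Int) < 12)]
      by_cases hm12 : m + 12 ≤ 0
      · rw [PySem.Int.floordiv_eq_ediv_of_pos (by norm_num : (0:Int) < 12),
            PySem.Int.mod_eq_emod_of_pos (by norm_num : (0:Int) < 12)]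
        simp only [hm, hm12, if_pos, Prod.mk.injEq]
        constructor <;> omega
      · rw [PySem.Int.floordiv_eq_ediv_of_pos (by norm_num : (0:Int) < 12),
            PySem.Int.mod_eq_emod_of_pos (by norm_num : (0:Int) < 12)]
        simp only [hm, hm12, if_pos, if_false, Prod.mk.injEq]
        constructor <;> omega
    · simp [hm]

theorem calculate_start_date_py_spec_aux (reference_date : String) (months_back : Int) (date_format : String)
    (hpre : Pre_calculate_start_date_py reference_date months_back date_format) :
    calculate_start_date_py reference_date months_back date_format
      = calculate_start_date_py_alt reference_date months_back date_format := by
  unfold calculate_start_date_py calculate_start_date_py_alt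
  by_cases hdf : date_format = "%Y%m"
  · obtain ⟨h1, h2⟩ := hpre hdf
    obtain ⟨ry, hry⟩ := Option.isSome_iff_exists.mp h1
    obtain ⟨rm, hrm⟩ := Option.isSome_iff_exists.mp h2
    simp only [hdf, if_pos, hry, hrm]
    rw [pvLoopA_closed (1 - (rm - months_back + 1)).toNat _ _ le_rfl]
    simp [pvFmtA, pvFmtB, pvPadA, pvPadB]
  · simp [hdf]

-- ===== VERDICT (by name: the statement is the Claim_ definition above) =====
theorem calculate_start_date_py_spec : Claim_equal_calculate_start_date_py := by
  intro rd mb df _ hpre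
  exact calculate_start_date_py_spec_aux rd mb df hpre
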